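-- pv_equiv track=rewrite | github.com/yagna-1/Order_Book | api/views.py | sum_sizes_at_price_levels
-- ===== SOURCE A (Python) =====
-- def sum_sizes_at_price_levels(data):
--     consolidated_levels = []
--     level_dict = {}
--
--     for entry in data:
--         price = entry['price']
--         size = entry['size']
--
--         if price in level_dict:
--             level_dict[price] += size
--         else:
--             level_dict[price] = size
--
--     for price, size in level_dict.items():
--         consolidated_levels.append({'price': price, 'size': size})
--
--     # Sort consolidated levels by price
--     consolidated_levels = sorted(consolidated_levels, key=lambda x: x['price'], reverse=True)
--
--     return consolidated_levels
-- ===== SOURCE B (Python) =====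
-- def sum_sizes_at_price_levels(data):
--     prices = sorted({entry['price'] for entry in data}, reverse=True)
--     return [{'price': p,
--              'size': sum(e['size'] for e in data if e['price'] == p)}
--             for p in prices]
-- ===== Notes on version B (the rewrite author's own statement) =====
-- stated objective: alternative
-- what changed: Replaces the dict accumulation + dict-to-list rebuild + final sort of dicts by a set comprehension of the distinct prices sorted descending, with one summing comprehension per price.
import Mathlib
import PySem

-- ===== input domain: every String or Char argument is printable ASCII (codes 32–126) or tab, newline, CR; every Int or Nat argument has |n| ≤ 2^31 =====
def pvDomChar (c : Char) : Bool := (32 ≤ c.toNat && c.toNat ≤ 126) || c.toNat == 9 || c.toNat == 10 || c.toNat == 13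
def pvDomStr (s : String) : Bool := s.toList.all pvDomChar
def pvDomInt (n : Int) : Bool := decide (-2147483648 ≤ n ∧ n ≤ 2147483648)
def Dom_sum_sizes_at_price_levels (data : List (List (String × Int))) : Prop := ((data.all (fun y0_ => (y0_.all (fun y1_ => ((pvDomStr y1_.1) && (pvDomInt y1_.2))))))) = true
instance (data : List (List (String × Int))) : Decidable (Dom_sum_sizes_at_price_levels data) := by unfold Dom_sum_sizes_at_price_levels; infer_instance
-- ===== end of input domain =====

-- B replaces A's dict accumulation + rebuild + sort-of-dicts by sorting the distinct prices
-- descending and summing the sizes per price; alternative decomposition, not claimed faster.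


-- ===== PORT A =====
-- entry[k] on a Python dict entry: total form via getD; the KeyError case (key absent) is
-- excluded by Pre_, under which get? is some and getD equals it.
def pvGet (e : List (String × Int)) (k : String) : Int := (PySem.Dict.mk e).getD k 0

def sum_sizes_at_price_levels (data : List (List (String × Int))) : List (List (String × Int)) :=
  let level_dict := data.foldl (fun d entry =>
      let price := pvGet entry "price"
      let size := pvGet entry "size"
      if d.contains price then d.insert price (d.getD price 0 + size)
      else d.insert price size) PySem.Dict.empty
  let consolidated := level_dict.items.foldl
      (fun acc pr => acc ++ [[("price", pr.1), ("size", pr.2)]]) []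
  PySem.List.sorted consolidated (fun x => pvGet x "price") true

-- ===== PORT B =====
def sum_sizes_at_price_levels_alt (data : List (List (String × Int))) : List (List (String × Int)) :=
  let prices := PySem.List.sorted (PySem.Set.ofList (data.map (fun e => pvGet e "price"))) (fun p => p) true
  prices.map (fun p =>
    [("price", p),
     ("size", data.foldl (fun acc e => if pvGet e "price" = p then acc + pvGet e "size" else acc) 0)])

-- ===== PRECONDITION & SPEC =====
-- Pre_ = exactly the inputs where Python A returns: every entry has both keys 'price' and
-- 'size' (otherwise entry['price']/entry['size'] raises KeyError in A and B alike).
def Pre_sum_sizes_at_price_levels (data : List (List (String × Int))) : Prop :=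
  ∀ e ∈ data, (PySem.Dict.mk e).contains "price" = true ∧ (PySem.Dict.mk e).contains "size" = true
instance (data : List (List (String × Int))) : Decidable (Pre_sum_sizes_at_price_levels data) := by
  unfold Pre_sum_sizes_at_price_levels; infer_instance
def pvWitness_sum_sizes_at_price_levels : (List (List (String × Int))) :=
  [[("price", 3), ("size", 2)], [("price", 1), ("size", 5)], [("price", 3), ("size", 4)]]
def Spec_sum_sizes_at_price_levels (data : List (List (String × Int))) (out : List (List (String × Int))) : Prop := out = sum_sizes_at_price_levels_alt data
instance (data : List (List (String × Int))) (out : List (List (String × Int))) : Decidable (Spec_sum_sizes_at_price_levels data out) := by unfold Spec_sum_sizes_at_price_levels; infer_instance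

-- ===== CLAIM (what is proved, stated in full; the proofs are below) =====
def Claim_equal_sum_sizes_at_price_levels : Prop := ∀ (data : List (List (String × Int))), Dom_sum_sizes_at_price_levels data → Pre_sum_sizes_at_price_levels data → Spec_sum_sizes_at_price_levels data (sum_sizes_at_price_levels data)

-- ===== LEMMAS AND PROOFS =====

-- total sum of the sizes of the entries whose price is p
def pvSumS (p : Int) : List (List (String × Int)) → Int
  | [] => 0
  | e :: rest => (if pvGet e "price" = p then pvGet e "size" else 0) + pvSumS p rest

theorem pv_foldl_sum (p : Int) (l : List (List (String × Int))) (acc : Int) :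
    l.foldl (fun acc e => if pvGet e "price" = p then acc + pvGet e "size" else acc) acc
      = acc + pvSumS p l := by
  induction l generalizing acc with
  | nil => simp [pvSumS]
  | cons e rest ih => simp only [List.foldl, pvSumS, ih]; split_ifs <;> ring

-- A's accumulation step, written as a single insert
def pvStepA (d : PySem.Dict Int Int) (entry : List (String × Int)) : PySem.Dict Int Int :=
  d.insert (pvGet entry "price")
    (if d.contains (pvGet entry "price") then d.getD (pvGet entry "price") 0 + pvGet entry "size"
     else pvGet entry "size")

theorem pv_stepA_eq :
    (fun (d : PySem.Dict Int Int) (entry : List (String × Int)) =>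
      if d.contains (pvGet entry "price") = true then
        d.insert (pvGet entry "price") (d.getD (pvGet entry "price") 0 + pvGet entry "size")
      else d.insert (pvGet entry "price") (pvGet entry "size")) = pvStepA := by
  funext d e
  simp only [pvStepA, apply_ite (PySem.Dict.insert d (pvGet e "price"))]

theorem pv_accum_getD (l : List (List (String × Int))) (d : PySem.Dict Int Int) (q : Int) :
    (l.foldl pvStepA d).getD q 0 = d.getD q 0 + pvSumS q l := by
  induction l generalizing d with
  | nil => simp [pvSumS]
  | cons e rest ih =>
    simp only [List.foldl, pvSumS, ih]
    have hstep : (pvStepA d e).getD q 0 =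
        if q = pvGet e "price" then d.getD q 0 + pvGet e "size" else d.getD q 0 := by
      by_cases hq : q = pvGet e "price"
      · rw [if_pos hq, hq]
        by_cases hc : d.contains (pvGet e "price") = true
        · simp [pvStepA, hc, PySem.Dict.getD_insert_self]
        · have h0 : d.getD (pvGet e "price") 0 = 0 :=
            PySem.Dict.getD_of_not_contains d 0 (by simpa using hc)
          simp [pvStepA, hc, PySem.Dict.getD_insert_self, h0]
      · rw [if_neg hq]
        simp [pvStepA, PySem.Dict.getD_insert_of_ne (hne := hq)]
    rw [hstep]
    split_ifs <;> omega

theorem pv_accum_keys (l : List (List (String × Int))) :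
    (l.foldl pvStepA PySem.Dict.empty).keys = PySem.Set.ofList (l.map (fun e => pvGet e "price")) := by
  have := PySem.Dict.keys_foldl_insert_key (l := l) (key := fun e => pvGet e "price")
    (f := fun d e => (if d.contains (pvGet e "price") then d.getD (pvGet e "price") 0 + pvGet e "size"
     else pvGet e "size")) (d := PySem.Dict.empty)
  simpa [pvStepA, PySem.Dict.keys_empty, PySem.Set.update_nil_left] using this

theorem pv_accum_nodup (l : List (List (String × Int))) :
    (l.foldl pvStepA PySem.Dict.empty).keys.Nodup := by
  exact PySem.Dict.nodup_keys_foldl_insert_key l (fun e => pvGet e "price")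
    (fun d e => (if d.contains (pvGet e "price") then d.getD (pvGet e "price") 0 + pvGet e "size"
     else pvGet e "size")) PySem.Dict.empty (by simp [PySem.Dict.keys_empty])

theorem pv_foldl_append {α β : Type} (f : α → β) (l : List α) (acc : List β) :
    l.foldl (fun acc x => acc ++ [f x]) acc = acc ++ l.map f := by
  induction l generalizing acc with
  | nil => simp
  | cons x rest ih => simp [List.foldl, ih]

theorem pv_key_ent (p s : Int) : pvGet [("price", p), ("size", s)] "price" = p := by
  simp [pvGet, PySem.Dict.getD_eq_get?_getD, PySem.Dict.get?_mk_cons]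

-- ===== VERDICT (by name: the statement is the Claim_ definition above) =====
theorem sum_sizes_at_price_levels_spec : Claim_equal_sum_sizes_at_price_levels := by
  intro data _hdom _hpre
  unfold Spec_sum_sizes_at_price_levels sum_sizes_at_price_levels sum_sizes_at_price_levels_alt
  dsimp only []
  rw [pv_stepA_eq]
  set ps := PySem.Set.ofList (data.map (fun e => pvGet e "price")) with hps
  set ent : Int → List (String × Int) := fun p => [("price", p), ("size", pvSumS p data)] with hent
  have hitems : (data.foldl pvStepA PySem.Dict.empty).items = ps.map (fun p => (p, pvSumS p data)) := by
    rw [PySem.Dict.items_eq_map_keys _ (pv_accum_nodup data) 0, pv_accum_keys data]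
    exact List.map_congr_left (fun p _ => by
      rw [pv_accum_getD data PySem.Dict.empty p]; simp)
  rw [hitems, pv_foldl_append (fun pr : Int × Int => [("price", pr.1), ("size", pr.2)]) _ []]
  have hmapent : (ps.map (fun p => (p, pvSumS p data))).map
      (fun pr : Int × Int => [("price", pr.1), ("size", pr.2)]) = ps.map ent := by
    rw [List.map_map]
    exact List.map_congr_left (fun p _ => by simp [hent])
  rw [List.nil_append, hmapent]
  have hnd : ps.Nodup := PySem.Set.nodup_ofList _
  have hsortnd : (PySem.List.sorted ps (fun p => p) true).Nodup :=
    ((PySem.List.sorted_perm (xs := ps) (key := fun p => p) (rev := true)).symm.nodup hnd)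
  have hperm : ((PySem.List.sorted ps (fun p => p) true).map ent).Perm (ps.map ent) :=
    (PySem.List.sorted_perm (xs := ps) (key := fun p => p) (rev := true)).map ent
  have hge : (PySem.List.sorted ps (fun p => p) true).Pairwise (fun a b => b ≤ a) :=
    PySem.List.sorted_pairwise_rev (xs := ps) (key := fun p => p)
  have hgt : (PySem.List.sorted ps (fun p => p) true).Pairwise (fun a b => b < a) := by
    have h2 := hge.and hsortnd
    exact h2.imp (fun {a b} h => lt_of_le_of_ne h.1 (Ne.symm h.2))
  have hpair : ((PySem.List.sorted ps (fun p => p) true).map ent).Pairwise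
      (fun a b => pvGet b "price" < pvGet a "price") := by
    rw [List.pairwise_map]
    refine hgt.imp (fun {a b} h => ?_)
    simpa [hent, pv_key_ent] using h
  rw [PySem.List.sorted_rev_eq_of_perm_of_pairwise_gt _ _ (fun x => pvGet x "price") hperm hpair]
  refine List.map_congr_left (fun p _ => ?_)
  simp [hent, pv_foldl_sum]
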